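-- pv_equiv track=rewrite | github.com/ray-ruisun/video_analysis_flow | src/steps/step_consensus.py | _majority_value
-- ===== SOURCE A (Python) =====
-- from collections import Counter
-- from typing import List, Dict, Any, Optional
--
-- def _majority_value(values: List[Any], min_count: int = 1) -> str:
--     """
--     多数票规则：返回最常见的值（不再返回 Varied）
--     """
--     if not values:
--         return "N/A"
--     # 过滤掉 None 和空字符串
--     valid_values = [v for v in values if v is not None and v != ""]
--     if not valid_values:
--         return "N/A"
--     counter = Counter(valid_values)
--     most_common = counter.most_common(1)
--     if most_common:
--         return str(most_common[0][0])
--     return "N/A"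
-- ===== SOURCE B (Python) =====
-- def _majority_value(values, min_count=1):
--     if not values:
--         return "N/A"
--     rest = [v for v in values if v is not None and v != ""]
--     if not rest:
--         return "N/A"
--     # Successive extraction: repeatedly count all copies of the first remaining
--     # value, then remove them; the first value with a strictly greater count
--     # wins, which reproduces Counter.most_common(1)'s first-insertion tie-break.
--     best = None
--     best_cnt = 0
--     while rest:
--         head = rest[0]
--         cnt = rest.count(head)
--         if cnt > best_cnt:
--             best, best_cnt = head, cnt
--         rest = [v for v in rest if v != head]
--     return str(best)
-- ===== Notes on version B (the rewrite author's own statement) =====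
-- stated objective: alternative
-- what changed: replaced the Counter frequency table + most_common(1) with a successive-extraction loop that repeatedly counts and removes all copies of the first remaining value from a shrinking list, keeping the first value whose count is strictly greater than the best so far
import Mathlib
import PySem

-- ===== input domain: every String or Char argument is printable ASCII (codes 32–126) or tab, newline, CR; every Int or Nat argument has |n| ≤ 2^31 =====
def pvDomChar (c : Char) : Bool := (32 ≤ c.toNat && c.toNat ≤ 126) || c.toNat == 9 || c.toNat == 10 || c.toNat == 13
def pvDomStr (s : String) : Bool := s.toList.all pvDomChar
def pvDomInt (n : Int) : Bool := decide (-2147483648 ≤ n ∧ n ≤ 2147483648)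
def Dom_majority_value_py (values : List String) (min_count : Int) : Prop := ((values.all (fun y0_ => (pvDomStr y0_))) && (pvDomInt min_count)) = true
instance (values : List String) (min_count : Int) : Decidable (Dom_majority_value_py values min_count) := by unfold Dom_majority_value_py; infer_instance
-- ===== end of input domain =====

-- B replaces A's Counter most_common(1) with a successive-extraction loop over a shrinking
-- list (different algorithm, same values and tie-break); objective: alternative.

-- ===== PORT A =====
-- str(x) is the identity on a str argument; Counter.most_common(1) is heapq.nlargest(1, items, key=count),
-- i.e. [max(counter.items(), key=itemgetter(1))] (first-insertion tie-break) = PySem.List.max? over the items.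
def majority_value_py (values : List String) (min_count : Int) : String :=
  if values = [] then "N/A"
  else
    let valid_values := values.filter (fun v => !(v == ""))
    if valid_values = [] then "N/A"
    else
      let counter := PySem.Dict.counter valid_values
      let most_common := (PySem.List.max? counter.items (fun p => p.2)).toList
      match most_common with
      | p :: _ => p.1
      | [] => "N/A"

-- ===== PORT B =====
-- the while loop of Source B: rest shrinks each turn (all copies of rest[0] are removed)
def pvAltLoop (rest : List String) (best : Option String) (best_cnt : Int) : Option String :=
  match rest with
  | [] => best
  | head :: t =>
    let cnt : Int := PySem.List.count (head :: t) head
    let nxt := (head :: t).filter (fun v => !(v == head))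
    if best_cnt < cnt then pvAltLoop nxt (some head) cnt
    else pvAltLoop nxt best best_cnt
termination_by rest.length
decreasing_by
  all_goals
    simp only [List.filter_cons, beq_self_eq_true, Bool.not_true, List.length_cons]
    exact Nat.lt_succ_of_le (List.length_filter_le _ _)

def majority_value_py_alt (values : List String) (min_count : Int) : String :=
  if values = [] then "N/A"
  else
    let rest := values.filter (fun v => !(v == ""))
    if rest = [] then "N/A"
    else
      -- return str(best): best is never None here (rest ≠ []); str(None) would be "None"
      (pvAltLoop rest none 0).getD "None"

-- ===== PRECONDITION & SPEC =====
def Spec_majority_value_py (values : List String) (min_count : Int) (out : String) : Prop := out = majority_value_py_alt values min_count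
instance (values : List String) (min_count : Int) (out : String) : Decidable (Spec_majority_value_py values min_count out) := by unfold Spec_majority_value_py; infer_instance

-- ===== CLAIM (what is proved, stated in full; the proofs are below) =====
def Claim_equal_majority_value_py : Prop := ∀ (values : List String) (min_count : Int), Dom_majority_value_py values min_count → Spec_majority_value_py values min_count (majority_value_py values min_count)

-- ===== LEMMAS AND PROOFS =====

def pvStep {α : Type} (key : α → Int) (acc : Option α) (x : α) : Option α :=
  match acc with
  | none => some x
  | some m => if key m < key x then some x else some m

theorem pv_max?_eq_foldl {α : Type} (key : α → Int) (xs : List α) :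
    PySem.List.max? xs key = xs.foldl (pvStep key) none := rfl

theorem pv_step_mem {α : Type} (key : α → Int) (s : List α) (x : α) (hx : x ∈ s) :
    pvStep key (PySem.List.max? s key) x = PySem.List.max? s key := by
  cases h : PySem.List.max? s key with
  | none =>
      rw [(PySem.List.max?_eq_none_iff _ _).mp h] at hx
      simp at hx
  | some m =>
      have := PySem.List.max?_isMax h x hx
      simp [pvStep, not_lt.mpr this]

theorem pv_max?_ofList {α : Type} [BEq α] [LawfulBEq α] (key : α → Int) (xs : List α) (s : PySem.Set α) :
    PySem.List.max? (List.foldl PySem.Set.add s xs) key = xs.foldl (pvStep key) (PySem.List.max? s key) := by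
  induction xs generalizing s with
  | nil => rfl
  | cons x t ih =>
      have hstep : PySem.List.max? (PySem.Set.add s x) key = pvStep key (PySem.List.max? s key) x := by
        by_cases hx : x ∈ s
        · rw [pv_step_mem key s x hx]
          simp [PySem.Set.add, hx]
        · have hadd : PySem.Set.add s x = s ++ [x] := by
            simp [PySem.Set.add, hx]
          rw [hadd, pv_max?_eq_foldl, List.foldl_append, ← pv_max?_eq_foldl]
          rfl
      rw [List.foldl_cons, List.foldl_cons, ih, hstep]

theorem pv_step_map_pair {α : Type} (cnt : α → Int) (acc : Option α) (x : α) :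
    pvStep (fun p : α × Int => p.2) (acc.map (fun k => (k, cnt k))) (x, cnt x)
      = (pvStep cnt acc x).map (fun k => (k, cnt k)) := by
  cases acc with
  | none => rfl
  | some m => simp only [pvStep, Option.map_some]; split_ifs <;> rfl

theorem pv_max?_map_pair {α : Type} (cnt : α → Int) (xs : List α) (acc : Option α) :
    (xs.map (fun k => (k, cnt k))).foldl (pvStep (fun p : α × Int => p.2)) (acc.map (fun k => (k, cnt k)))
      = (xs.foldl (pvStep cnt) acc).map (fun k => (k, cnt k)) := by
  induction xs generalizing acc with
  | nil => rfl
  | cons x t ih =>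
      rw [List.map_cons, List.foldl_cons, List.foldl_cons, pv_step_map_pair cnt acc x]
      exact ih _

theorem pv_main {α : Type} [BEq α] [LawfulBEq α] (cnt : α → Int) (valid : List α) :
    PySem.List.max? (List.map (fun k => (k, cnt k)) (PySem.Set.ofList valid)) (fun p => p.2)
      = Option.map (fun k => (k, cnt k)) (PySem.List.max? valid cnt) := by
  have h1 := pv_max?_map_pair cnt (PySem.Set.ofList valid) (none : Option α)
  simp only [Option.map_none] at h1
  rw [pv_max?_eq_foldl, h1]
  have h2 := pv_max?_ofList cnt valid ([] : PySem.Set α)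
  simp only [pv_max?_eq_foldl, List.foldl_nil] at h2
  rw [← PySem.Set.ofList_eq_foldl] at h2
  rw [h2]
  rfl

-- skipping elements whose key does not exceed the current best is a no-op for the fold
theorem pv_foldl_filter_skip {α : Type} [BEq α] [LawfulBEq α] (key : α → Int) (h : α) :
    ∀ (t : List α) (m : α), key h ≤ key m →
      List.foldl (pvStep key) (some m) (t.filter (fun v => !(v == h)))
        = List.foldl (pvStep key) (some m) t := by
  intro t
  induction t with
  | nil => intro m _; rfl
  | cons x s ih =>
      intro m hm
      by_cases hx : x = h
      · subst hx
        have : pvStep key (some m) x = some m := by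
          simp [pvStep, not_lt.mpr hm]
        simp only [List.filter_cons, beq_self_eq_true, Bool.not_true, List.foldl_cons, this]
        exact ih m hm
      · have hbx : (!(x == h)) = true := by simp [hx]
        simp only [List.filter_cons, hbx, if_pos, List.foldl_cons]
        cases hst : pvStep key (some m) x with
        | none => simp [pvStep] at hst; split at hst <;> simp_all
        | some m' =>
            have hm' : key h ≤ key m' := by
              simp only [pvStep] at hst
              split at hst
              · cases hst; omega
              · cases hst; exact hm
            rw [ih m' hm']

theorem pv_count_filter_ne {α : Type} [BEq α] [LawfulBEq α] (r : List α) (h v : α) (hv : v ≠ h) :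
    List.count v (r.filter (fun x => !(x == h))) = List.count v r := by
  induction r with
  | nil => rfl
  | cons x t ih =>
      by_cases hx : x = h
      · subst hx
        simp [List.count_cons, ih, Ne.symm hv]
      · have hbx : (!(x == h)) = true := by simp [hx]
        simp [List.filter_cons, hbx, List.count_cons, ih]

-- the successive-extraction loop computes max? (key = count in the full list), given the
-- invariant that counts in the remaining list agree with key
theorem pv_altLoop_eq_foldl (key : String → Int) :
    ∀ (n : ℕ) (r : List String) (acc : Option String) (bc : Int),
      r.length ≤ n →
      (∀ v ∈ r, (List.count v r : Int) = key v) →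
      ((acc = none ∧ bc = 0) ∨ (∃ m, acc = some m ∧ bc = key m)) →
      pvAltLoop r acc bc = r.foldl (pvStep key) acc := by
  intro n
  induction n with
  | zero =>
      intro r acc bc hlen _ _
      have : r = [] := List.eq_nil_of_length_eq_zero (Nat.le_zero.mp hlen)
      subst this; cases acc <;> simp [pvAltLoop]
  | succ n ih =>
      intro r acc bc hlen hinv hacc
      cases r with
      | nil => cases acc <;> simp [pvAltLoop]
      | cons head t =>
          have hcnt : (PySem.List.count (head :: t) head : Int) = key head := by
            have := hinv head (List.mem_cons_self)
            simpa [PySem.List.count] using this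
          have hpos : (0 : Int) < PySem.List.count (head :: t) head := by
            have h0 : 0 < List.count head (head :: t) := by
              simp [List.count_cons]
            simpa [PySem.List.count] using Int.natCast_pos.mpr h0
          have hnxtlen : ((head :: t).filter (fun v => !(v == head))).length ≤ n := by
            have h1 : ((head :: t).filter (fun v => !(v == head))).length ≤ t.length := by
              simp only [List.filter_cons, beq_self_eq_true, Bool.not_true]
              exact List.length_filter_le _ _
            have h2 : t.length ≤ n := by simpa using Nat.lt_succ_iff.mp (by simpa using hlen)
            omega
          have hnxtinv : ∀ v ∈ (head :: t).filter (fun v => !(v == head)),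
              (List.count v ((head :: t).filter (fun v => !(v == head))) : Int) = key v := by
            intro v hv
            have hvne : v ≠ head := by
              have := List.of_mem_filter hv
              simpa using this
            have hvmem : v ∈ head :: t := List.mem_of_mem_filter hv
            rw [pv_count_filter_ne _ _ _ hvne]
            exact hinv v hvmem
          have hfold : List.foldl (pvStep key) acc (head :: t)
              = List.foldl (pvStep key) (pvStep key acc head) ((head :: t).filter (fun v => !(v == head))) := by
            have hh : ∃ m', pvStep key acc head = some m' ∧ key head ≤ key m' := by
              cases acc with
              | none => exact ⟨head, rfl, le_refl _⟩
              | some m =>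
                  simp only [pvStep]
                  split_ifs with hlt
                  · exact ⟨head, rfl, le_refl _⟩
                  · exact ⟨m, rfl, not_lt.mp hlt⟩
            obtain ⟨m', hm', hkm'⟩ := hh
            have hfilter : (head :: t).filter (fun v => !(v == head)) = t.filter (fun v => !(v == head)) := by
              simp [List.filter_cons]
            rw [List.foldl_cons, hm', hfilter, pv_foldl_filter_skip key head t m' hkm']
          rcases hacc with ⟨hn, hb⟩ | ⟨m, hs, hb⟩
          · subst hn; subst hb
            rw [pvAltLoop]
            simp only [if_pos hpos]
            rw [ih _ _ _ hnxtlen hnxtinv (Or.inr ⟨head, rfl, by rw [← hcnt]⟩)]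
            rw [hfold]
            rfl
          · subst hs; subst hb
            rw [pvAltLoop]
            by_cases hlt : key m < (PySem.List.count (head :: t) head : Int)
            · rw [if_pos hlt, ih _ _ _ hnxtlen hnxtinv (Or.inr ⟨head, rfl, by rw [← hcnt]⟩), hfold]
              have : pvStep key (some m) head = some head := by
                simp [pvStep, hcnt ▸ hlt]
              rw [this]
            · rw [if_neg hlt, ih _ _ _ hnxtlen hnxtinv (Or.inr ⟨m, rfl, rfl⟩), hfold]
              have : pvStep key (some m) head = some m := by
                simp only [pvStep]
                rw [if_neg (hcnt ▸ hlt)]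
              rw [this]

theorem pv_altLoop_eq_max? (valid : List String) :
    pvAltLoop valid none 0 = PySem.List.max? valid (fun v => (List.count v valid : Int)) := by
  rw [pv_max?_eq_foldl]
  exact pv_altLoop_eq_foldl _ valid.length valid none 0 (le_refl _) (fun v _ => rfl) (Or.inl ⟨rfl, rfl⟩)

-- ===== VERDICT (by name: the statement is the Claim_ definition above) =====
theorem majority_value_py_spec : Claim_equal_majority_value_py := by
  intro values min_count _
  simp only [Spec_majority_value_py, majority_value_py, majority_value_py_alt]
  split_ifs with h0 h1
  · rfl
  · rfl
  · rw [PySem.Dict.items_counter, pv_main, pv_altLoop_eq_max?]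
    cases hm : PySem.List.max? (values.filter (fun v => !(v == "")))
        (fun k => ((List.count k (values.filter (fun v => !(v == ""))) : Nat) : Int)) with
    | none => exact absurd ((PySem.List.max?_eq_none_iff _ _).mp hm) h1
    | some m => rfl
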